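-- pv_equiv track=rewrite | github.com/Joel-Balmer/general-python-functions | Dictionary_substring_searcher.py | dict_substring_searcher
-- ===== SOURCE A (Python) =====
-- def dict_substring_searcher(main_dict, substrings, return_elements_missing_substring = 'n'):
--     sub_dict = {}
--
--     if type(substrings) == str:
--         substrings = [substrings]   # if a single string was entered not in a list, put it in a list that is length one.
--                                     # if we dont do this, (string in key for string in substrings) will iterate through
--                                     # the individual letters of the substring, since a type str is itself an iterable.
--                                     # It would then try and see if a letter in string is in keys, but we dont want to
--                                     # see if a single letter is in there, we want to know if the whole string is.
--                                     # This issue only arose when I added the any(stuff in brackets) and the all(stuff in brackets)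
--                                     # which handles the passing of multiple strings in a list.
--
--     if return_elements_missing_substring == 'y':
--         for key in main_dict:
--             if all(string not in key for string in substrings):
--                 sub_dict[key] = main_dict[key]
--
--     else:
--         for key in main_dict:
--             if any(string in key for string in substrings):
--                 sub_dict[key] = main_dict[key]
--
--     return(sub_dict)
-- ===== SOURCE B (Python) =====
-- def dict_substring_searcher(main_dict, substrings, return_elements_missing_substring='n'):
--     # Alternative decomposition: two staged passes with inverted loop nesting.
--     # Pass 1 (substring-major): for each substring, scan only the keys not yet
--     # matched; matched keys move into the 'matched' set and leave 'remaining'.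
--     # Pass 2: partition the dict by membership in 'matched', per the flag.
--     if isinstance(substrings, str):
--         substrings = [substrings]
--     matched = set()
--     remaining = list(main_dict)
--     for s in substrings:
--         still = []
--         for k in remaining:
--             if s in k:
--                 matched.add(k)
--             else:
--                 still.append(k)
--         remaining = still
--     if return_elements_missing_substring == 'y':
--         return {k: v for k, v in main_dict.items() if k not in matched}
--     return {k: v for k, v in main_dict.items() if k in matched}
-- ===== Notes on version B (the rewrite author's own statement) =====
-- stated objective: alternative
-- what changed: Instead of A's key-major single pass testing any/all substrings per key, B inverts the loop nesting: a first substring-major pass builds a set of all matched keys, then a second pass partitions the dict by set membership according to the flag.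
import Mathlib
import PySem

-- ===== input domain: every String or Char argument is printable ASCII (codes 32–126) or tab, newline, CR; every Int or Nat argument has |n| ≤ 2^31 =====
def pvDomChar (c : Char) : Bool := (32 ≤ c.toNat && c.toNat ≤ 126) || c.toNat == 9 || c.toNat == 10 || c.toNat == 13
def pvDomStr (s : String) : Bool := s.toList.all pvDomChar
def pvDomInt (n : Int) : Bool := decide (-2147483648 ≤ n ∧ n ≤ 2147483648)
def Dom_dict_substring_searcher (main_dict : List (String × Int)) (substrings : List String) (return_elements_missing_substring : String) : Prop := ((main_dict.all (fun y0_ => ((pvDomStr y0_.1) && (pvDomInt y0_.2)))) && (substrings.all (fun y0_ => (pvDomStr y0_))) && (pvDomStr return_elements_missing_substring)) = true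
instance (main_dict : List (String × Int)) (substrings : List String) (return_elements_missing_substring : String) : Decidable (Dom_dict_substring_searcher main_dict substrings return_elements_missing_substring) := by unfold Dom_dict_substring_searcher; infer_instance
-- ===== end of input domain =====

-- B replaces A's key-major any/all filtering pass by a substring-major pass that
-- first builds the set of matched keys, then partitions the dict by membership.


-- ===== PORT A =====
-- literal port: the incoming Python dict is the assoc list via PySem.Dict.ofList;
-- 'for key in main_dict' iterates its items, 'main_dict[key]' is the dict lookup.
def dict_substring_searcher (main_dict : List (String × Int)) (substrings : List String) (return_elements_missing_substring : String) : List (String × Int) :=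
  let d := PySem.Dict.ofList main_dict
  if return_elements_missing_substring == "y" then
    (d.items.foldl (fun sd kv =>
        if substrings.all (fun s => !(PySem.Str.isIn s kv.1)) then sd.insert kv.1 (d.getD kv.1 0) else sd)
      PySem.Dict.empty).items
  else
    (d.items.foldl (fun sd kv =>
        if substrings.any (fun s => PySem.Str.isIn s kv.1) then sd.insert kv.1 (d.getD kv.1 0) else sd)
      PySem.Dict.empty).items

-- ===== PORT B =====
-- pass 1: substring-major loops; per substring only the still-unmatched keys are
-- scanned, matched keys go into a PySem.Set and leave the remaining list
-- pass 2: filter the dict's items by (non-)membership in that set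
def dict_substring_searcher_alt (main_dict : List (String × Int)) (substrings : List String) (return_elements_missing_substring : String) : List (String × Int) :=
  let d := PySem.Dict.ofList main_dict
  let st : PySem.Set String × List String :=
    substrings.foldl (fun st s =>
      st.2.foldl (fun st2 k =>
        if PySem.Str.isIn s k then (PySem.Set.add st2.1 k, st2.2) else (st2.1, st2.2 ++ [k]))
        (st.1, []))
      (PySem.Set.empty, d.keys)
  if return_elements_missing_substring == "y" then
    d.items.filter (fun kv => !(PySem.Set.contains st.1 kv.1))
  else
    d.items.filter (fun kv => PySem.Set.contains st.1 kv.1)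

-- ===== PRECONDITION & SPEC =====
def Spec_dict_substring_searcher (main_dict : List (String × Int)) (substrings : List String) (return_elements_missing_substring : String) (out : List (String × Int)) : Prop := out = dict_substring_searcher_alt main_dict substrings return_elements_missing_substring
instance (main_dict : List (String × Int)) (substrings : List String) (return_elements_missing_substring : String) (out : List (String × Int)) : Decidable (Spec_dict_substring_searcher main_dict substrings return_elements_missing_substring out) := by unfold Spec_dict_substring_searcher; infer_instance

-- ===== CLAIM (what is proved, stated in full; the proofs are below) =====
def Claim_equal_dict_substring_searcher : Prop := ∀ (main_dict : List (String × Int)) (substrings : List String) (return_elements_missing_substring : String), Dom_dict_substring_searcher main_dict substrings return_elements_missing_substring → Spec_dict_substring_searcher main_dict substrings return_elements_missing_substring (dict_substring_searcher main_dict substrings return_elements_missing_substring)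

-- ===== LEMMAS AND PROOFS =====

-- A's guarded insert loop over the items of a key-nodup dict is the filter of its items.
theorem pv_fold_items (d : PySem.Dict String Int) (p : String × Int → Bool) (h : d.keys.Nodup) :
    (d.items.foldl (fun sd kv => if p kv then sd.insert kv.1 (d.getD kv.1 0) else sd)
      PySem.Dict.empty).items = d.items.filter p := by
  rw [← List.foldl_filter]
  rw [PySem.List.foldl_congr_mem _ _ (fun sd (kv : String × Int) => sd.insert kv.1 kv.2) _ ?_]
  · rw [PySem.Dict.items_foldl_insert_fresh _ Prod.fst Prod.snd _ ?fresh ?nd]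
    · simp [PySem.Dict.empty]
    case fresh => intro a _; rfl
    case nd =>
      have hk : (d.items.map Prod.fst).Nodup := h
      exact ((List.filter_sublist (l := d.items)).map Prod.fst).nodup hk
  · intro acc kv hkv
    have hmem : (kv.1, kv.2) ∈ d.items := by
      have := List.mem_of_mem_filter hkv
      simpa using this
    have hgd := PySem.Dict.getD_of_mem_items d hmem h 0
    simp [hgd]

-- B's inner loop over the remaining keys: adds the matching keys, keeps the rest
theorem pv_inner_eq (s : String) (rem : List String) (m : PySem.Set String) (acc : List String) :
    rem.foldl (fun st2 k =>
        if PySem.Str.isIn s k then (PySem.Set.add st2.1 k, st2.2) else (st2.1, st2.2 ++ [k])) (m, acc)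
      = (rem.foldl (fun m k => if PySem.Str.isIn s k then PySem.Set.add m k else m) m,
         acc ++ rem.filter (fun k => !(PySem.Str.isIn s k))) := by
  induction rem generalizing m acc with
  | nil => simp
  | cons k t ih =>
    rw [List.foldl_cons, List.foldl_cons, List.filter_cons]
    by_cases hp : PySem.Str.isIn s k = true
    · rw [if_pos hp, if_pos hp, ih, if_neg (by rw [hp]; decide)]
    · rw [if_neg hp, if_neg hp, ih,
        if_pos (by rw [Bool.eq_false_iff.mpr hp]; decide)]
      simp

-- membership after the guarded-add fold
theorem pv_addfold_mem (s : String) (rem : List String) (m : PySem.Set String) (x : String) :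
    (x ∈ rem.foldl (fun m k => if PySem.Str.isIn s k then PySem.Set.add m k else m) m)
      ↔ x ∈ m ∨ (x ∈ rem ∧ PySem.Str.isIn s x = true) := by
  induction rem generalizing m with
  | nil => simp
  | cons k t ih =>
    rw [List.foldl_cons]
    by_cases hp : PySem.Str.isIn s k = true
    · rw [if_pos hp, ih, PySem.Set.mem_add]
      constructor
      · rintro (⟨h | rfl⟩ | ⟨h1, h2⟩)
        exacts [Or.inl h, Or.inr ⟨List.mem_cons_self .., hp⟩,
          Or.inr ⟨List.mem_cons_of_mem _ h1, h2⟩]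
      · rintro (h | ⟨h1, h2⟩)
        · exact Or.inl (Or.inl h)
        · rcases List.mem_cons.mp h1 with rfl | h1
          · exact Or.inl (Or.inr rfl)
          · exact Or.inr ⟨h1, h2⟩
    · rw [if_neg hp, ih]
      constructor
      · rintro (h | ⟨h1, h2⟩)
        exacts [Or.inl h, Or.inr ⟨List.mem_cons_of_mem _ h1, h2⟩]
      · rintro (h | ⟨h1, h2⟩)
        · exact Or.inl h
        · rcases List.mem_cons.mp h1 with rfl | h1
          · exact absurd h2 hp
          · exact Or.inr ⟨h1, h2⟩

-- membership in B's matched set after the outer substring-major loop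
theorem pv_outer_mem (subs : List String) (m : PySem.Set String) (rem : List String) (x : String) :
    (x ∈ (subs.foldl (fun st s =>
        st.2.foldl (fun st2 k =>
          if PySem.Str.isIn s k then (PySem.Set.add st2.1 k, st2.2) else (st2.1, st2.2 ++ [k]))
          (st.1, [])) (m, rem)).1)
      ↔ x ∈ m ∨ (x ∈ rem ∧ ∃ s ∈ subs, PySem.Str.isIn s x = true) := by
  induction subs generalizing m rem with
  | nil => simp
  | cons s t ih =>
    rw [List.foldl_cons]
    dsimp only
    rw [pv_inner_eq, ih, pv_addfold_mem, List.nil_append, List.mem_filter]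
    rcases hx : PySem.Str.isIn s x with _ | _
    · constructor
      · rintro ((h | ⟨h1, h2⟩) | ⟨⟨h1, _⟩, s', hs', h2⟩)
        · exact Or.inl h
        · exact absurd h2 (by decide)
        · exact Or.inr ⟨h1, s', List.mem_cons_of_mem _ hs', h2⟩
      · rintro (h | ⟨h1, s', hs', h2⟩)
        · exact Or.inl (Or.inl h)
        · rcases List.mem_cons.mp hs' with rfl | hs'
          · rw [h2] at hx; exact absurd hx (by decide)
          · exact Or.inr ⟨⟨h1, by decide⟩, s', hs', h2⟩
    · constructor
      · rintro ((h | ⟨h1, _⟩) | ⟨⟨h1, hn⟩, _⟩)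
        · exact Or.inl h
        · exact Or.inr ⟨h1, s, List.mem_cons_self .., hx⟩
        · exact absurd hn (by decide)
      · rintro (h | ⟨h1, _⟩)
        · exact Or.inl (Or.inl h)
        · exact Or.inl (Or.inr ⟨h1, rfl⟩)

-- for a key of the dict, membership in the matched set coincides with A's any-test
theorem pv_matched_contains (subs : List String) (d : PySem.Dict String Int)
    (kv : String × Int) (hkv : kv ∈ d.items) :
    PySem.Set.contains
      ((subs.foldl (fun st s =>
        st.2.foldl (fun st2 k =>
          if PySem.Str.isIn s k then (PySem.Set.add st2.1 k, st2.2) else (st2.1, st2.2 ++ [k]))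
          (st.1, [])) (PySem.Set.empty, d.keys)).1) kv.1
      = subs.any (fun s => PySem.Str.isIn s kv.1) := by
  have hk : kv.1 ∈ d.keys := List.mem_map_of_mem hkv
  rcases h : subs.any (fun s => PySem.Str.isIn s kv.1) with _ | _
  · rw [List.any_eq_false] at h
    simp only [PySem.Set.contains_eq_listContains]
    rw [Bool.eq_false_iff, Ne, List.contains_iff_mem, pv_outer_mem]
    rintro (habs | ⟨_, s, hs, hin⟩)
    · simp [PySem.Set.empty] at habs
    · exact absurd hin (h s hs)
  · rw [List.any_eq_true] at h
    obtain ⟨s, hs, hin⟩ := h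
    simp only [PySem.Set.contains_eq_listContains]
    rw [List.contains_iff_mem, pv_outer_mem]
    exact Or.inr ⟨hk, s, hs, by simpa using hin⟩

-- ===== VERDICT (by name: the statement is the Claim_ definition above) =====
theorem dict_substring_searcher_spec : Claim_equal_dict_substring_searcher := by
  intro md subs flag _
  unfold Spec_dict_substring_searcher dict_substring_searcher dict_substring_searcher_alt
  dsimp only
  have hnd := PySem.Dict.nodup_keys_ofList (κ := String) (ν := Int) md
  by_cases hf : (flag == "y") = true
  · rw [if_pos hf, if_pos hf, pv_fold_items _ _ hnd]
    apply List.filter_congr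
    intro kv hkv
    rw [pv_matched_contains _ _ _ hkv, ← List.not_any_eq_all_not]
  · rw [Bool.not_eq_true] at hf
    rw [if_neg (by simp [hf]), if_neg (by simp [hf]), pv_fold_items _ _ hnd]
    apply List.filter_congr
    intro kv hkv
    rw [pv_matched_contains _ _ _ hkv]
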